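-- pv_equiv track=rewrite | github.com/Rowles66/brx-platform | brx-app/scripts/generate_ui_api_matrix.py | extract_crud_verbs
-- ===== SOURCE A (Python) =====
-- from typing import Dict, List, Set, Any
--
-- def extract_crud_verbs(endpoints_for_feature: List[Dict]) -> str:
--     """Extract CRUD verbs from endpoint methods"""
--     methods = set()
--     for endpoint in endpoints_for_feature:
--         method = endpoint.get('method', 'GET')
--         methods.add(method)
--
--     # Map HTTP methods to CRUD operations
--     crud_mapping = {
--         'GET': 'Read',
--         'POST': 'Create',
--         'PUT': 'Update',
--         'PATCH': 'Update',
--         'DELETE': 'Delete'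
--     }
--
--     crud_verbs = []
--     for method in sorted(methods):
--         if method in crud_mapping:
--             crud_verbs.append(crud_mapping[method])
--
--     return ', '.join(crud_verbs) if crud_verbs else 'Read'
-- ===== SOURCE B (Python) =====
-- def extract_crud_verbs(endpoints_for_feature):
--     """Extract CRUD verbs from endpoint methods"""
--     # One pass over the endpoints keeping five boolean flags, no set, no sort,
--     # no mapping dict: the sorted order DELETE < GET < PATCH < POST < PUT is fixed.
--     has_delete = has_get = has_patch = has_post = has_put = False
--     for endpoint in endpoints_for_feature:
--         m = endpoint.get('method', 'GET')
--         has_delete = has_delete or m == 'DELETE'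
--         has_get = has_get or m == 'GET'
--         has_patch = has_patch or m == 'PATCH'
--         has_post = has_post or m == 'POST'
--         has_put = has_put or m == 'PUT'
--     verbs = []
--     if has_delete:
--         verbs.append('Delete')
--     if has_get:
--         verbs.append('Read')
--     if has_patch:
--         verbs.append('Update')
--     if has_post:
--         verbs.append('Create')
--     if has_put:
--         verbs.append('Update')
--     return ', '.join(verbs) if verbs else 'Read'
-- ===== Notes on version B (the rewrite author's own statement) =====
-- stated objective: alternative
-- what changed: B replaces the set + sort + dict-filter pipeline by a single pass that tracks five boolean presence flags (one per known HTTP method) and then emits the verbs in the fixed sorted key order DELETE, GET, PATCH, POST, PUT.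
import Mathlib
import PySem

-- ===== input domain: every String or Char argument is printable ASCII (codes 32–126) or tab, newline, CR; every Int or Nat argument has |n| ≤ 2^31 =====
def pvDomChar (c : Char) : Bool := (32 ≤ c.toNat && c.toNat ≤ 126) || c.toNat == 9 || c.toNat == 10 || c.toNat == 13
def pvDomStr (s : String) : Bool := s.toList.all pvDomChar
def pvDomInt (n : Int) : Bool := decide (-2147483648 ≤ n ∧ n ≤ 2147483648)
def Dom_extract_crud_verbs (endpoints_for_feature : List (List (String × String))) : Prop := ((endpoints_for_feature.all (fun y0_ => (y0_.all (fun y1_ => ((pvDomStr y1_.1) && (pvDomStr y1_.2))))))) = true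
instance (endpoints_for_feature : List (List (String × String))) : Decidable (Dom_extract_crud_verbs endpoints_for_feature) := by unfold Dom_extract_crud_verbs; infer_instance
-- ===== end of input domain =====

-- B replaces A's set + sort + dict-filter pipeline by a single flag-tracking pass
-- that emits the verbs in the fixed sorted key order (alternative decomposition, same result).


-- ===== PORT A =====
-- crud_mapping, a Python dict literal
def pvCrudMapping : PySem.Dict String String :=
  PySem.Dict.mk [("GET", "Read"), ("POST", "Create"), ("PUT", "Update"),
                 ("PATCH", "Update"), ("DELETE", "Delete")]

def extract_crud_verbs (endpoints_for_feature : List (List (String × String))) : String :=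
  -- methods = set(); for endpoint in …: methods.add(endpoint.get('method', 'GET'))
  let methods : PySem.Set String :=
    endpoints_for_feature.foldl
      (fun s endpoint => PySem.Set.add s ((PySem.Dict.mk endpoint).getD "method" "GET"))
      PySem.Set.empty
  -- for method in sorted(methods): if method in crud_mapping: crud_verbs.append(crud_mapping[method])
  let crud_verbs : List String :=
    (PySem.List.sorted methods (fun x => x)).foldl
      (fun acc m => if pvCrudMapping.contains m then acc ++ [pvCrudMapping.getD m ""] else acc) []
  -- return ', '.join(crud_verbs) if crud_verbs else 'Read'
  if crud_verbs = [] then "Read" else PySem.Str.join ", " crud_verbs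

-- ===== PORT B =====
-- the flag-tracking loop: five booleans, updated per endpoint
def pvScanMethods : List (List (String × String)) → Bool → Bool → Bool → Bool → Bool →
    Bool × Bool × Bool × Bool × Bool
  | [], d, g, pa, po, pu => (d, g, pa, po, pu)
  | ep :: rest, d, g, pa, po, pu =>
      let m := (PySem.Dict.mk ep).getD "method" "GET"
      pvScanMethods rest (d || m == "DELETE") (g || m == "GET") (pa || m == "PATCH")
        (po || m == "POST") (pu || m == "PUT")

def extract_crud_verbs_alt (endpoints_for_feature : List (List (String × String))) : String :=
  let (d, g, pa, po, pu) := pvScanMethods endpoints_for_feature false false false false false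
  -- verbs = []; if has_delete: verbs.append('Delete'); … (fixed sorted key order)
  let verbs : List String :=
    (if d then ["Delete"] else []) ++ (if g then ["Read"] else []) ++
    (if pa then ["Update"] else []) ++ (if po then ["Create"] else []) ++
    (if pu then ["Update"] else [])
  if verbs = [] then "Read" else PySem.Str.join ", " verbs

-- ===== PRECONDITION & SPEC =====
def Spec_extract_crud_verbs (endpoints_for_feature : List (List (String × String))) (out : String) : Prop := out = extract_crud_verbs_alt endpoints_for_feature
instance (endpoints_for_feature : List (List (String × String))) (out : String) : Decidable (Spec_extract_crud_verbs endpoints_for_feature out) := by unfold Spec_extract_crud_verbs; infer_instance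

-- ===== CLAIM (what is proved, stated in full; the proofs are below) =====
def Claim_equal_extract_crud_verbs : Prop := ∀ (endpoints_for_feature : List (List (String × String))), Dom_extract_crud_verbs endpoints_for_feature → Spec_extract_crud_verbs endpoints_for_feature (extract_crud_verbs endpoints_for_feature)

-- ===== LEMMAS AND PROOFS =====

-- the mapping's (key, verb) pairs in sorted key order, for the proofs only
def pvCrudTable : List (String × String) :=
  [("DELETE", "Delete"), ("GET", "Read"), ("PATCH", "Update"),
   ("POST", "Create"), ("PUT", "Update")]

-- membership in the literal mapping = membership in the table's key list
theorem pvContains_mapping_iff (m : String) :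
    pvCrudMapping.contains m = true ↔ m ∈ pvCrudTable.map Prod.fst := by
  simp [pvCrudMapping, PySem.Dict.contains_mk, pvCrudTable]
  tauto

-- filtering a strictly increasing list by the mapping's keys
-- equals filtering the sorted key table by membership in that list
theorem pvKeys_filter (s : List String) (hp : s.Pairwise (· < ·)) :
    s.filter (fun m => pvCrudMapping.contains m)
      = (pvCrudTable.map Prod.fst).filter (fun k => decide (k ∈ s)) := by
  have hkeys : (pvCrudTable.map Prod.fst).Pairwise (fun a b : String => a < b) := by
    simp [pvCrudTable]
    refine ⟨⟨?_, ?_, ?_, ?_⟩, ⟨?_, ?_, ?_⟩, ⟨?_, ?_⟩, ?_⟩ <;> decide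
  have h1 : (s.filter (fun m => pvCrudMapping.contains m)).Pairwise (fun a b : String => a < b) :=
    hp.filter _
  have h2 : ((pvCrudTable.map Prod.fst).filter (fun k => decide (k ∈ s))).Pairwise
      (fun a b : String => a < b) := hkeys.filter _
  have hperm : (s.filter (fun m => pvCrudMapping.contains m)).Perm
      ((pvCrudTable.map Prod.fst).filter (fun k => decide (k ∈ s))) := by
    refine (List.perm_ext_iff_of_nodup ?_ ?_).mpr ?_
    · exact h1.imp (fun h => ne_of_lt h)
    · exact h2.imp (fun h => ne_of_lt h)
    · intro a
      simp only [List.mem_filter, decide_eq_true_eq]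
      constructor
      · rintro ⟨ha, hc⟩
        exact ⟨(pvContains_mapping_iff a).mp hc, ha⟩
      · rintro ⟨hk, ha⟩
        exact ⟨ha, (pvContains_mapping_iff a).mpr hk⟩
  exact hperm.eq_of_pairwise (fun a b _ _ hab hba => absurd hab (lt_asymm hba)) h1 h2

-- A's verb list, written as a table filter
theorem pvVerbs_eq (s : List String) (hp : s.Pairwise (· < ·)) :
    (s.filter (fun m => pvCrudMapping.contains m)).map (fun m => pvCrudMapping.getD m "")
      = (pvCrudTable.filter (fun p => decide (p.1 ∈ s))).map Prod.snd := by
  rw [pvKeys_filter s hp, List.filter_map, List.map_map]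
  refine List.map_congr_left ?_
  intro p hpmem
  have hmem : p ∈ pvCrudTable := List.mem_of_mem_filter hpmem
  fin_cases hmem <;> rfl

-- the scan computes, for each flag, 'seed || some collected method equals the key'
theorem pvScanMethods_eq (e : List (List (String × String)))
    (d g pa po pu : Bool) :
    pvScanMethods e d g pa po pu =
      (let L := e.map (fun ep => (PySem.Dict.mk ep).getD "method" "GET")
       (d || L.any (· == "DELETE"), g || L.any (· == "GET"), pa || L.any (· == "PATCH"),
        po || L.any (· == "POST"), pu || L.any (· == "PUT"))) := by
  induction e generalizing d g pa po pu with
  | nil => simp [pvScanMethods]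
  | cons ep rest ih =>
      simp only [pvScanMethods, ih, List.map_cons, List.any_cons]
      simp [Bool.or_assoc]

theorem pvAny_beq (L : List String) (k : String) :
    L.any (· == k) = decide (k ∈ L) := by
  induction L with
  | nil => simp
  | cons x xs ih =>
      simp only [List.any_cons, ih, List.mem_cons]
      by_cases h : x = k
      · simp [h]
      · simp [h, Ne.symm h]

-- ===== VERDICT (by name: the statement is the Claim_ definition above) =====
theorem extract_crud_verbs_spec : Claim_equal_extract_crud_verbs := by
  intro e _
  unfold Spec_extract_crud_verbs extract_crud_verbs extract_crud_verbs_alt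
  have hM : e.foldl
      (fun s endpoint => PySem.Set.add s ((PySem.Dict.mk endpoint).getD "method" "GET"))
      PySem.Set.empty
      = PySem.Set.ofList (e.map (fun endpoint => (PySem.Dict.mk endpoint).getD "method" "GET")) := by
    rw [← PySem.Set.update_map_eq_foldl_add]
    exact PySem.Set.update_nil_left _
  simp only [hM]
  set L := e.map (fun endpoint => (PySem.Dict.mk endpoint).getD "method" "GET") with hL
  set M := PySem.Set.ofList L with hMdef
  have hpair : (PySem.List.sorted M (fun x => x)).Pairwise (fun a b : String => a < b) := by
    rw [hMdef]; exact PySem.List.sorted_ofList_pairwise_lt _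
  rw [PySem.List.foldl_append_if, List.nil_append]
  rw [pvVerbs_eq _ hpair]
  have hmem : ∀ k : String, decide (k ∈ PySem.List.sorted M (fun x => x)) = decide (k ∈ L) := by
    intro k
    simp only [PySem.List.mem_sorted, hMdef, PySem.Set.mem_ofList]
  rw [pvScanMethods_eq]
  simp only [← hL, pvAny_beq, Bool.false_or]
  have hfilter : (pvCrudTable.filter (fun p => decide (p.1 ∈ PySem.List.sorted M (fun x => x)))).map Prod.snd
      = (if decide ("DELETE" ∈ L) then ["Delete"] else []) ++
        (if decide ("GET" ∈ L) then ["Read"] else []) ++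
        (if decide ("PATCH" ∈ L) then ["Update"] else []) ++
        (if decide ("POST" ∈ L) then ["Create"] else []) ++
        (if decide ("PUT" ∈ L) then ["Update"] else []) := by
    simp only [pvCrudTable, List.filter, hmem]
    by_cases h1 : "DELETE" ∈ L <;> by_cases h2 : "GET" ∈ L <;> by_cases h3 : "PATCH" ∈ L <;>
      by_cases h4 : "POST" ∈ L <;> by_cases h5 : "PUT" ∈ L <;> simp [h1, h2, h3, h4, h5]
  rw [hfilter]
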